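-- pv_equiv track=rewrite | github.com/anderssonlab/DeepCompARE | DCMain_Fig1_showcase_mpra/plot_importance_by_position.py | reduce_protein_names
-- ===== SOURCE A (Python) =====
-- def reduce_protein_names(protein_list):
--     protein_list=list(set(protein_list))
--     # order alphabetically
--     protein_list.sort()
--     # if there are more than 2 proteins sharing same prefix of length > 4
--     # only keep the prefix, followed by "s"
--     # eg: hoxa9, hoxa9b, hoxa9c -> hoxa9s
--     protein_dict={}
--     for protein in protein_list:
--         prefix=protein[:4]
--         if prefix in protein_dict:
--             protein_dict[prefix].append(protein)
--         else:
--             protein_dict[prefix]=[protein]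
--     prefix_list=[]
--     for prefix in protein_dict:
--         if len(protein_dict[prefix])>1:
--             prefix_list.append(prefix+"s")
--         else:
--             prefix_list.append(protein_dict[prefix][0])
--     # concatenate by "\n"
--     return "\n".join(prefix_list)
-- ===== SOURCE B (Python) =====
-- def reduce_protein_names(protein_list):
--     names = sorted(set(protein_list))
--     labels = []
--     seen = []
--     for name in names:
--         prefix = name[:4]
--         if prefix not in seen:
--             seen.append(prefix)
--             group = [n for n in names if n[:4] == prefix]
--             labels.append(prefix + "s" if len(group) > 1 else name)
--     return "\n".join(labels)
-- ===== Notes on version B (the rewrite author's own statement) =====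
-- stated objective: alternative
-- what changed: Replaces A's two-phase dict-of-groups (build prefix->members dict, then loop over the dict) with a single pass over the sorted names that keeps a seen-prefix list and, for each new prefix, filters the full list once to size the group.
import Mathlib
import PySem

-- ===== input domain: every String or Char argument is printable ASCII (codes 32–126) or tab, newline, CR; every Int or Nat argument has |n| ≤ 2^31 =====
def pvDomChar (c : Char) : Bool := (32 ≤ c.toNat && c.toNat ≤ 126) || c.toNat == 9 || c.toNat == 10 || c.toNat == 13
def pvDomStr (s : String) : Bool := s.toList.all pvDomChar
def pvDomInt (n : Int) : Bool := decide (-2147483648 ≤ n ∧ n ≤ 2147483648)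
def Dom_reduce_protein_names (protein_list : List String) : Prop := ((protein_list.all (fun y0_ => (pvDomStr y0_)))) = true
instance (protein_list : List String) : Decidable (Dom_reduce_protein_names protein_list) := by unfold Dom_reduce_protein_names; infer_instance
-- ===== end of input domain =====

-- B replaces A's dict-of-groups (build groups, then a second loop over the dict) by a single pass
-- over the sorted names with a seen-prefix list and a per-new-prefix filter (objective: alternative).

-- ===== PORT A =====
def reduce_protein_names (protein_list : List String) : String :=
  let pl := PySem.List.sorted (PySem.Set.ofList protein_list) (fun x => x)
  let protein_dict := pl.foldl (fun (d : PySem.Dict String (List String)) protein =>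
    let prefix_ := PySem.Str.slice protein none (some 4)
    if d.contains prefix_ then d.insert prefix_ (d.getD prefix_ [] ++ [protein])
    else d.insert prefix_ [protein]) PySem.Dict.empty
  let prefix_list := protein_dict.keys.foldl (fun acc prefix_ =>
    if 1 < (protein_dict.getD prefix_ []).length then acc ++ [prefix_ ++ "s"]
    else acc ++ [PySem.List.pyGetD (protein_dict.getD prefix_ []) 0 ""]) []
  PySem.Str.join "\n" prefix_list

-- ===== PORT B =====
def reduce_protein_names_alt (protein_list : List String) : String :=
  let names := PySem.List.sorted (PySem.Set.ofList protein_list) (fun x => x)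
  let st := names.foldl (fun (st : List String × List String) name =>
    let prefix_ := PySem.Str.slice name none (some 4)
    if st.2.contains prefix_ then st
    else
      let group := names.filter (fun n => PySem.Str.slice n none (some 4) == prefix_)
      (st.1 ++ [if 1 < group.length then prefix_ ++ "s" else name], st.2 ++ [prefix_])) ([], [])
  PySem.Str.join "\n" st.1

-- ===== PRECONDITION & SPEC =====
def Spec_reduce_protein_names (protein_list : List String) (out : String) : Prop := out = reduce_protein_names_alt protein_list
instance (protein_list : List String) (out : String) : Decidable (Spec_reduce_protein_names protein_list out) := by unfold Spec_reduce_protein_names; infer_instance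

-- ===== CLAIM (what is proved, stated in full; the proofs are below) =====
def Claim_equal_reduce_protein_names : Prop := ∀ (protein_list : List String), Dom_reduce_protein_names protein_list → Spec_reduce_protein_names protein_list (reduce_protein_names protein_list)

-- ===== LEMMAS AND PROOFS =====

-- the common key: a protein's 4-character prefix
def pvKey (s : String) : String := PySem.Str.slice s none (some 4)

theorem pvKey_def (s : String) : PySem.Str.slice s none (some 4) = pvKey s := rfl

-- the group of a prefix and the canonical label list both ports reach
def pvGroup (pl : List String) (k : String) : List String :=
  pl.filter (fun x => pvKey x == k)

def pvEntry (pl : List String) (k : String) : String :=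
  if 1 < (pvGroup pl k).length then k ++ "s" else (pvGroup pl k).getD 0 ""

def pvCanon (pl ks : List String) : List String := ks.map (pvEntry pl)

-- dedup of a snoc: drop a repeated element, append a fresh one
theorem pvDedup_snoc_mem {l : List String} {a : String} (h : a ∈ l) :
    PySem.List.dedup (l ++ [a]) = PySem.List.dedup l := by
  have h1 : PySem.Set.ofList (l ++ [a]) = PySem.Set.add (PySem.Set.ofList l) a := by
    simp [PySem.Set.ofList]
  have h2 : a ∈ PySem.Set.ofList l := (PySem.Set.mem_ofList l a).mpr h
  simp only [PySem.List.dedup_eq_ofList, h1]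
  simp [PySem.Set.add, h2]

theorem pvDedup_snoc_not_mem {l : List String} {a : String} (h : a ∉ l) :
    PySem.List.dedup (l ++ [a]) = PySem.List.dedup l ++ [a] := by
  have h1 : PySem.Set.ofList (l ++ [a]) = PySem.Set.add (PySem.Set.ofList l) a := by
    simp [PySem.Set.ofList]
  have h2 : a ∉ PySem.Set.ofList l := fun hc => h ((PySem.Set.mem_ofList l a).mp hc)
  simp only [PySem.List.dedup_eq_ofList, h1]
  simp [PySem.Set.add, h2]

-- A's grouping step is Dict.modify with default []
theorem pvStepA_eq (d : PySem.Dict String (List String)) (p : String) :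
    (if d.contains (pvKey p) then d.insert (pvKey p) (d.getD (pvKey p) [] ++ [p])
     else d.insert (pvKey p) [p]) = d.modify (pvKey p) [] (· ++ [p]) := by
  have hm : d.modify (pvKey p) [] (· ++ [p]) = d.insert (pvKey p) (d.getD (pvKey p) [] ++ [p]) := rfl
  by_cases h : d.contains (pvKey p) = true
  · rw [if_pos h, hm]
  · have h' : d.contains (pvKey p) = false := by simpa using h
    rw [if_neg h, hm, PySem.Dict.getD_of_not_contains d [] h']
    rfl

-- characterisation of A's dict: lookups are the groups, keys are the deduped prefixes
theorem pvDictA_getD (pl : List String) (k : String) :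
    ((pl.foldl (fun (d : PySem.Dict String (List String)) x => d.modify (pvKey x) [] (· ++ [x]))
      PySem.Dict.empty).getD k []) = pvGroup pl k := by
  have h1 : pl.foldl (fun (d : PySem.Dict String (List String)) x => d.modify (pvKey x) [] (· ++ [x]))
        PySem.Dict.empty
      = (pl.map (fun x => (pvKey x, x))).foldl
          (fun (d : PySem.Dict String (List String)) q => d.modify q.1 [] (· ++ [q.2]))
          PySem.Dict.empty := by
    rw [List.foldl_map]
  rw [h1, PySem.Dict.getD_foldl_modify_append]
  simp [pvGroup, List.filter_map, Function.comp_def]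

theorem pvDictA_keys (pl : List String) :
    ((pl.foldl (fun (d : PySem.Dict String (List String)) x => d.modify (pvKey x) [] (· ++ [x]))
      PySem.Dict.empty).keys) = PySem.List.dedup (pl.map pvKey) := by
  have h := PySem.Dict.keys_foldl_modify_key pl pvKey ([] : List String)
    (fun _ x => (· ++ [x])) PySem.Dict.empty
  rw [h]
  have he : (PySem.Dict.empty : PySem.Dict String (List String)).keys = ([] : List String) := rfl
  rw [he]
  have hu : PySem.Set.update (PySem.Set.empty : PySem.Set String) (pl.map pvKey)
      = PySem.Set.ofList (pl.map pvKey) := PySem.Set.update_empty (pl.map pvKey)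
  rw [show ([] : List String) = (PySem.Set.empty : PySem.Set String) from rfl, hu,
    PySem.List.dedup_eq_ofList]

-- A's output is the canonical label list
theorem pvA_canon (xs : List String) :
    reduce_protein_names xs =
      PySem.Str.join "\n"
        (pvCanon (PySem.List.sorted (PySem.Set.ofList xs) (fun x => x))
          (PySem.List.dedup ((PySem.List.sorted (PySem.Set.ofList xs) (fun x => x)).map pvKey))) := by
  simp only [reduce_protein_names, pvKey_def]
  have hfun : (fun (d : PySem.Dict String (List String)) (protein : String) =>
      if d.contains (pvKey protein) then d.insert (pvKey protein) (d.getD (pvKey protein) [] ++ [protein])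
      else d.insert (pvKey protein) [protein])
      = fun (d : PySem.Dict String (List String)) x => d.modify (pvKey x) [] (· ++ [x]) := by
    funext d p
    exact pvStepA_eq d p
  rw [hfun]
  simp only [pvDictA_keys, pvDictA_getD]
  have hstep : (fun (acc : List String) (k : String) =>
      if 1 < (pvGroup (PySem.List.sorted (PySem.Set.ofList xs) (fun x => x)) k).length
      then acc ++ [k ++ "s"]
      else acc ++ [PySem.List.pyGetD (pvGroup (PySem.List.sorted (PySem.Set.ofList xs) (fun x => x)) k) 0 ""])
      = fun (acc : List String) (k : String) =>
          acc ++ [pvEntry (PySem.List.sorted (PySem.Set.ofList xs) (fun x => x)) k] := by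
    funext acc k
    by_cases h : 1 < (pvGroup (PySem.List.sorted (PySem.Set.ofList xs) (fun x => x)) k).length
    · simp [pvEntry, h]
    · simp [pvEntry, h, PySem.List.pyGetD_zero]
  rw [hstep, PySem.List.foldl_append_singleton_eq_map]
  simp [pvCanon]

-- B's loop invariant: after processing the prefix p of names, labels/seen are canonical for p
theorem pvB_fold (pl : List String) :
    ∀ (rest p : List String), pl = p ++ rest →
      (rest.foldl (fun (st : List String × List String) name =>
        let prefix_ := PySem.Str.slice name none (some 4)
        if st.2.contains prefix_ then st
        else
          let group := pl.filter (fun n => PySem.Str.slice n none (some 4) == prefix_)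
          (st.1 ++ [if 1 < group.length then prefix_ ++ "s" else name], st.2 ++ [prefix_]))
        (pvCanon pl (PySem.List.dedup (p.map pvKey)), PySem.List.dedup (p.map pvKey)))
      = (pvCanon pl (PySem.List.dedup (pl.map pvKey)), PySem.List.dedup (pl.map pvKey)) := by
  intro rest
  induction rest with
  | nil =>
    intro p h
    rw [List.append_nil] at h
    subst h
    rfl
  | cons x rest ih =>
    intro p h
    rw [List.foldl_cons]
    by_cases hm : pvKey x ∈ p.map pvKey
    · have hc : (PySem.List.dedup (p.map pvKey)).contains (pvKey x) = true := by
        simp [hm]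
      have e : PySem.List.dedup ((p ++ [x]).map pvKey) = PySem.List.dedup (p.map pvKey) := by
        rw [List.map_append, List.map_singleton, pvDedup_snoc_mem hm]
      have h' : pl = (p ++ [x]) ++ rest := by rw [h, List.append_cons]
      have := ih (p ++ [x]) h'
      rw [e] at this
      simp only [pvKey_def] at this
      simp only [pvKey_def, hc, if_true]
      exact this
    · have hc : (PySem.List.dedup (p.map pvKey)).contains (pvKey x) = false := by
        simp [hm]
      have hpnil : p.filter (fun n => pvKey n == pvKey x) = [] := by
        rw [List.filter_eq_nil_iff]
        intro a ha hk
        exact hm (List.mem_map.mpr ⟨a, ha, by simpa using hk⟩)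
      have hg : pvGroup pl (pvKey x) = x :: rest.filter (fun n => pvKey n == pvKey x) := by
        rw [pvGroup, h, List.filter_append, hpnil, List.nil_append, List.filter_cons]
        simp
      have hlabel : (if 1 < (pl.filter (fun n => pvKey n == pvKey x)).length
            then pvKey x ++ "s" else x) = pvEntry pl (pvKey x) := by
        rw [pvEntry]
        have : (pl.filter (fun n => pvKey n == pvKey x)) = pvGroup pl (pvKey x) := rfl
        rw [this, hg]
        simp
      have e : PySem.List.dedup ((p ++ [x]).map pvKey)
          = PySem.List.dedup (p.map pvKey) ++ [pvKey x] := by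
        rw [List.map_append, List.map_singleton, pvDedup_snoc_not_mem hm]
      have h' : pl = (p ++ [x]) ++ rest := by rw [h, List.append_cons]
      have := ih (p ++ [x]) h'
      rw [e] at this
      simp only [pvKey_def] at this
      simp only [pvKey_def, hc, Bool.false_eq_true, if_false]
      rw [hlabel]
      have hcanon : pvCanon pl (PySem.List.dedup (p.map pvKey)) ++ [pvEntry pl (pvKey x)]
          = pvCanon pl (PySem.List.dedup (p.map pvKey) ++ [pvKey x]) := by
        simp [pvCanon]
      rw [hcanon]
      exact this

theorem pvB_canon (xs : List String) :
    reduce_protein_names_alt xs =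
      PySem.Str.join "\n"
        (pvCanon (PySem.List.sorted (PySem.Set.ofList xs) (fun x => x))
          (PySem.List.dedup ((PySem.List.sorted (PySem.Set.ofList xs) (fun x => x)).map pvKey))) := by
  simp only [reduce_protein_names_alt]
  have h0 : (([], []) : List String × List String)
      = (pvCanon (PySem.List.sorted (PySem.Set.ofList xs) (fun x => x))
          (PySem.List.dedup (([] : List String).map pvKey)),
         PySem.List.dedup (([] : List String).map pvKey)) := rfl
  rw [h0, pvB_fold (PySem.List.sorted (PySem.Set.ofList xs) (fun x => x))
    (PySem.List.sorted (PySem.Set.ofList xs) (fun x => x)) [] rfl]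




-- ===== VERDICT (by name: the statement is the Claim_ definition above) =====
theorem reduce_protein_names_spec : Claim_equal_reduce_protein_names := by
  intro xs _
  unfold Spec_reduce_protein_names
  rw [pvA_canon, pvB_canon]
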